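-- pv_equiv track=rewrite | github.com/boerschi/CHILDESAnalysis | scripts/heuristicStress.py | addStress
-- ===== SOURCE A (Python) =====
-- vowels = "AA AE AH AO AW AY EH ER EY IH IY OW OY UH UW".split()
--
-- def nVowels(word):
--     res = 0
--     for w in word.split():
--         if w in vowels:
--             res += 1
--     return res
--
-- def addStress(word):
--     res = []
--     nV = nVowels(word)
--     if nV == 0:
--         return word
--     elif nV == 1:
--         res = []
--         for w in word.split():
--             if w in vowels:
--                 res.append("%s1"%w)
--             else:
--                 res.append(w)
--         return " ".join(res)
--     else:
--         curV = 1
--         tarV = nV-1 #penultimate vowel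
--         for w in word.split():
--             if w in vowels:
--                 if curV == tarV:
--                     res.append("%s1"%w)
--                 else:
--                     res.append("%s0"%w)
--                 curV += 1
--             else:
--                 res.append(w)
--         return " ".join(res)
-- ===== SOURCE B (Python) =====
-- vowels = "AA AE AH AO AW AY EH ER EY IH IY OW OY UH UW".split()
--
-- def addStress(word):
--     # Single right-to-left pass: count vowels from the end, the vowel where the
--     # running count reaches 2 is the penultimate one and gets "1".
--     toks = word.split()
--     out = []
--     seen = 0
--     for t in reversed(toks):
--         if t in vowels:
--             seen += 1
--             out.append(t + ("1" if seen == 2 else "0"))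
--         else:
--             out.append(t)
--     if seen == 0:
--         return word
--     if seen == 1:
--         return " ".join(t + "1" if t in vowels else t for t in toks)
--     return " ".join(reversed(out))
-- ===== Notes on version B (the rewrite author's own statement) =====
-- stated objective: alternative
-- what changed: B drops the nVowels pre-count and A's forward ordinal-vs-target loop: it makes one right-to-left pass that counts vowels from the end and stresses the vowel where that running count reaches 2 (the penultimate vowel), building the output back-to-front; only the no-vowel and single-vowel outcomes are decided after the pass.
import Mathlib
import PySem

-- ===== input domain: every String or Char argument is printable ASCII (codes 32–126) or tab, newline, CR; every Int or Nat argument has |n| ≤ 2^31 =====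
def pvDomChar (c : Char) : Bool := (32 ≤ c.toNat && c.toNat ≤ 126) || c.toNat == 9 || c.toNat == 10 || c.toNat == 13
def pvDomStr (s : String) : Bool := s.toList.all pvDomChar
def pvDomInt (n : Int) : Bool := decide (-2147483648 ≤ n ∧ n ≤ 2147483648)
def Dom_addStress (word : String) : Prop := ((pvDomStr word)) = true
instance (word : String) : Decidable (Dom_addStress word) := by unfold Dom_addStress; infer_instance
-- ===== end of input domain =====

-- B replaces the count-then-mark scheme by a single right-to-left pass (alternative decomposition, same cost).

-- module-level context shared by both Pythons: vowels = "AA … UW".split()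
def pvVowels : List String := PySem.Str.split₀ "AA AE AH AO AW AY EH ER EY IH IY OW OY UH UW"

def isV (w : String) : Bool := pvVowels.contains w

-- ===== PORT A =====
def nVowels (word : String) : Int :=
  (PySem.Str.split₀ word).foldl (fun res w => if isV w then res + 1 else res) 0

def addStress (word : String) : String :=
  let nV := nVowels word
  if nV == 0 then word
  else if nV == 1 then
    PySem.Str.join " "
      ((PySem.Str.split₀ word).foldl
        (fun res w => if isV w then res ++ [w ++ "1"] else res ++ [w]) [])
  else
    PySem.Str.join " "
      ((PySem.Str.split₀ word).foldl
        (fun (p : List String × Int) w =>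
          if isV w then
            (p.1 ++ [if p.2 == nV - 1 then w ++ "1" else w ++ "0"], p.2 + 1)
          else (p.1 ++ [w], p.2)) ([], 1)).1

-- ===== PORT B =====
def addStress_alt (word : String) : String :=
  let toks := PySem.Str.split₀ word
  let p := toks.reverse.foldl
    (fun (p : List String × Int) t =>
      if isV t then (p.1 ++ [t ++ (if p.2 + 1 == 2 then "1" else "0")], p.2 + 1)
      else (p.1 ++ [t], p.2)) ([], 0)
  if p.2 == 0 then word
  else if p.2 == 1 then
    PySem.Str.join " " (toks.map (fun t => if isV t then t ++ "1" else t))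
  else PySem.Str.join " " p.1.reverse

-- ===== PRECONDITION & SPEC =====
def Spec_addStress (word : String) (out : String) : Prop := out = addStress_alt word
instance (word : String) (out : String) : Decidable (Spec_addStress word out) := by unfold Spec_addStress; infer_instance

-- ===== CLAIM (what is proved, stated in full; the proofs are below) =====
def Claim_equal_addStress : Prop := ∀ (word : String), Dom_addStress word → Spec_addStress word (addStress word)

-- ===== LEMMAS AND PROOFS =====

def countV (toks : List String) : Nat := (toks.filter isV).length

lemma countV_cons_pos (w : String) (ws : List String) (h : isV w = true) :
    countV (w :: ws) = countV ws + 1 := by simp [countV, h]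

lemma countV_cons_neg (w : String) (ws : List String) (h : isV w = false) :
    countV (w :: ws) = countV ws := by simp [countV, h]

lemma countV_reverse (toks : List String) : countV toks.reverse = countV toks := by
  simp [countV]

/-- A's marking loop (else branch), acc-free form -/
def markA (c tar : Int) : List String → List String
  | [] => []
  | w :: ws =>
    if isV w then (if c == tar then w ++ "1" else w ++ "0") :: markA (c + 1) tar ws
    else w :: markA c tar ws

/-- B's right-to-left marking, acc-free, processing a reversed token list with running count s -/
def markF (s : Int) : List String → List String
  | [] => []
  | w :: ws =>
    if isV w then (w ++ (if s + 1 == 2 then "1" else "0")) :: markF (s + 1) ws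
    else w :: markF s ws

/-- B's marking re-expressed on the original (unreversed) list: each vowel is marked by the
    count of vowels after it (plus the initial offset s). -/
def markG (s : Int) : List String → List String
  | [] => []
  | w :: ws =>
    if isV w then (w ++ (if s + ((countV ws : Nat) : Int) + 1 == 2 then "1" else "0")) :: markG s ws
    else w :: markG s ws

lemma markF_append (xs ys : List String) (s : Int) :
    markF s (xs ++ ys) = markF s xs ++ markF (s + ((countV xs : Nat) : Int)) ys := by
  induction xs generalizing s with
  | nil => simp [markF, countV]
  | cons w ws ih =>
    by_cases h : isV w = true
    · rw [countV_cons_pos w ws h]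
      simp only [List.cons_append, markF, if_pos h, ih]
      refine congrArg _ (congrArg _ (congrArg (fun z => markF z ys) ?_))
      push_cast; ring
    · have hf : isV w = false := by simpa using h
      rw [countV_cons_neg w ws hf]
      simp only [List.cons_append, markF, if_neg h, ih]

lemma markF_reverse (toks : List String) (s : Int) :
    (markF s toks.reverse).reverse = markG s toks := by
  induction toks generalizing s with
  | nil => simp [markF, markG]
  | cons w ws ih =>
    rw [List.reverse_cons, markF_append, List.reverse_append, ih]
    rw [countV_reverse]
    by_cases h : isV w = true
    · simp only [markF, markG, if_pos h]
      simp
    · simp only [markF, markG, if_neg h]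
      simp

/-- the fold in B's port, characterised -/
lemma foldB_char (l : List String) (acc : List String) (s : Int) :
    l.foldl
      (fun (p : List String × Int) t =>
        if isV t then (p.1 ++ [t ++ (if p.2 + 1 == 2 then "1" else "0")], p.2 + 1)
        else (p.1 ++ [t], p.2)) (acc, s)
      = (acc ++ markF s l, s + ((countV l : Nat) : Int)) := by
  induction l generalizing acc s with
  | nil => simp [markF, countV]
  | cons w ws ih =>
    rw [List.foldl_cons]
    by_cases h : isV w = true
    · rw [if_pos h, ih, countV_cons_pos w ws h]
      simp only [markF, if_pos h]
      refine Prod.ext (by simp) ?_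
      push_cast; ring
    · have hf : isV w = false := by simpa using h
      rw [if_neg h, ih, countV_cons_neg w ws hf]
      simp [markF, hf]

/-- B's marker equals A's ordinal-counter marker when the counters are in step and tar ≥ 1 -/
lemma markG_eq_markA (toks : List String) (c tar : Int)
    (hc : c + ((countV toks : Nat) : Int) = tar + 2) :
    markA c tar toks = markG 0 toks := by
  induction toks generalizing c with
  | nil => simp [markA, markG]
  | cons w ws ih =>
    by_cases h : isV w = true
    · rw [countV_cons_pos w ws h] at hc
      have hrec := ih (c + 1) (by push_cast at hc ⊢; omega)
      simp only [markA, markG, if_pos h, hrec]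
      refine congrArg (fun z => z :: markG 0 ws) ?_
      by_cases he : c = tar
      · rw [if_pos (by simpa using he), if_pos (by simp; omega)]
      · rw [if_neg (by simpa using he), if_neg (by simp; omega)]
    · have hf : isV w = false := by simpa using h
      rw [countV_cons_neg w ws hf] at hc
      simp only [markA, markG, if_neg h, ih c hc]

lemma nVowels_eq (word : String) :
    nVowels word = ((countV (PySem.Str.split₀ word) : Nat) : Int) := by
  unfold nVowels countV
  induction PySem.Str.split₀ word using List.reverseRecOn with
  | nil => simp
  | append_singleton l w ih =>
    by_cases h : isV w = true <;>
      simp [List.foldl_append, List.filter_append, h, ih]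

lemma foldA1_eq_map (toks : List String) (acc : List String) :
    toks.foldl (fun res w => if isV w then res ++ [w ++ "1"] else res ++ [w]) acc
      = acc ++ toks.map (fun w => if isV w then w ++ "1" else w) := by
  induction toks generalizing acc with
  | nil => simp
  | cons w ws ih =>
    by_cases h : isV w = true <;> simp [h, ih, List.append_assoc]

lemma foldA2_eq_markA (nV : Int) (toks : List String) :
    ∀ (acc : List String) (c : Int),
    (toks.foldl (fun (p : List String × Int) w =>
        if isV w then
          (p.1 ++ [if p.2 == nV - 1 then w ++ "1" else w ++ "0"], p.2 + 1)
        else (p.1 ++ [w], p.2)) (acc, c)).1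
      = acc ++ markA c (nV - 1) toks := by
  induction toks with
  | nil => intro acc c; simp [markA]
  | cons w ws ih =>
    intro acc c
    rw [List.foldl_cons]
    by_cases h : isV w = true
    · rw [if_pos h, ih]
      conv_rhs => rw [markA, if_pos h]
      simp
    · rw [if_neg h, ih]
      conv_rhs => rw [markA, if_neg h]
      simp

-- ===== VERDICT (by name: the statement is the Claim_ definition above) =====
theorem addStress_spec : Claim_equal_addStress := by
  intro word _
  unfold Spec_addStress addStress addStress_alt
  simp only []
  rw [nVowels_eq word, foldB_char]
  set toks := PySem.Str.split₀ word with htoks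
  rw [countV_reverse]
  have hz : (0 : Int) + ((countV toks : Nat) : Int) = ((countV toks : Nat) : Int) := by ring
  rw [hz]
  by_cases h0 : countV toks = 0
  · have e0 : ((((countV toks : Nat) : Int)) == 0) = true := by simp [h0]
    rw [e0]
    simp
  · by_cases h1 : countV toks = 1
    · have e0 : ((((countV toks : Nat) : Int)) == 0) = false := by simp [h1]
      have e1 : ((((countV toks : Nat) : Int)) == 1) = true := by simp [h1]
      rw [e0, e1]
      simp only [Bool.false_eq_true, if_false, if_true]
      rw [foldA1_eq_map toks []]
      simp
    · have h2 : 2 ≤ countV toks := by omega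
      have e0 : ((((countV toks : Nat) : Int)) == 0) = false := by simp; omega
      have e1 : ((((countV toks : Nat) : Int)) == 1) = false := by simp; omega
      rw [e0, e1]
      simp only [Bool.false_eq_true, if_false]
      rw [foldA2_eq_markA _ toks [] 1]
      simp only [List.nil_append]
      rw [markF_reverse,
        markG_eq_markA toks 1 (((countV toks : Nat) : Int) - 1) (by ring)]
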